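-- pv_equiv track=rewrite | github.com/nag2mani/ProblemSolving | Geeksforgeeks/POTD/18_Jan_2024.py | min_sprinklers
-- ===== SOURCE A (Python) =====
-- def min_sprinklers(gallery, n):
--
--     #Try to find the range of every sprinkler and then leftmost then rightmost.
--
--     n = len(gallery)
--
--     # Create a list of ranges
--     ranges = [[0, 0] for _ in range(n)]
--
--     for i in range(n):
--         if gallery[i] == -1:
--             continue
--
--         ranges[i][0] = max(0, i - gallery[i])
--         ranges[i][1] = min(n, i + gallery[i])
--
--     ranges.sort(key=lambda x: x[0])
--
--     start, i, res = 0, 0, 0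
--     curr_max = -1
--
--     while start < n:
--         while i < n:
--             if ranges[i][0] > start:
--                 break
--             curr_max = max(curr_max, ranges[i][1])
--             i += 1
--
--         if curr_max < start:
--             return -1
--
--         res += 1
--         start = curr_max + 1
--
--     return res
-- ===== SOURCE B (Python) =====
-- def min_sprinklers(gallery, n):
--     # Bucket intervals by (clamped) left endpoint, then a single jump-game scan: O(n), no sort.
--     n = len(gallery)
--     reach = [-1] * n  # reach[l] = furthest right endpoint among intervals whose left endpoint is l
--     for i, g in enumerate(gallery):
--         if g == -1:
--             continue
--         left = i - g
--         if left < 0: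
--             left = 0
--         if left < n:
--             right = i + g
--             if right > n:
--                 right = n
--             if right > reach[left]:
--                 reach[left] = right
--     res = 0
--     curr_end = -1   # everything up to curr_end is already covered
--     farthest = -1   # best right endpoint among intervals with left endpoint <= current position
--     for l in range(n):
--         if reach[l] > farthest:
--             farthest = reach[l]
--         if l > curr_end:
--             if farthest < l:
--                 return -1
--             res += 1
--             curr_end = farthest
--     return res
-- ===== Notes on version B (the rewrite author's own statement) =====
-- stated objective: faster
-- what changed: A builds one interval per cell, sorts them by left endpoint and runs a two-pointer sweep; B instead buckets each sprinkler's clamped left endpoint into a max-reach array and covers the gallery with a single jump-game scan, so the sort disappears.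
-- intended difference: On galleries where no working sprinkler waters position 0 but a -1 (no-sprinkler) entry is present and the working sprinklers water every other position, A counts the phantom [0,0] interval left over from its ranges initialisation and returns a positive sprinkler count, while B returns -1, the intended answer since position 0 cannot actually be watered. — e.g. on min_sprinklers([-1], 1): A returns 1, B returns -1
import Mathlib
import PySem

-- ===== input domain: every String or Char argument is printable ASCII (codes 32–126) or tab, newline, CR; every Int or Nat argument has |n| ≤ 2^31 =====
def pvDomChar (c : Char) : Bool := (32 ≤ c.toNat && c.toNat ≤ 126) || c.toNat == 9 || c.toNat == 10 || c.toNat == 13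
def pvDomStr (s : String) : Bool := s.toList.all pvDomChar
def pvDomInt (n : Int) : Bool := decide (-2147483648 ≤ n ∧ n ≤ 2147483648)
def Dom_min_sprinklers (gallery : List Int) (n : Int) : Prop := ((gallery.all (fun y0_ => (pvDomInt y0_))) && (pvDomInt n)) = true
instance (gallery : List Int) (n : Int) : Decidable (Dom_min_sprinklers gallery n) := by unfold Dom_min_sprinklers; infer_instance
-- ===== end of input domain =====

-- B replaces A's sort + two-pointer sweep by an O(n) bucket array (max reach per left endpoint)
-- and a single jump-game scan; where A's leftover [0,0] interval for a -1 (no-sprinkler) entry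
-- lets it pretend position 0 is watered, B intentionally returns -1 (see D_min_sprinklers).

-- ===== PORT A =====
-- inner `while i < n` loop: consume sorted ranges while their left endpoint is ≤ start,
-- accumulating curr_max (the pointer i is represented by the not-yet-consumed suffix)
def pvConsumeA (rest : List (Int × Int)) (start cm : Int) : List (Int × Int) × Int :=
  match rest with
  | [] => ([], cm)
  | q :: tl => if q.1 > start then (q :: tl, cm) else pvConsumeA tl start (max cm q.2)

-- outer `while start < n` loop of A
def pvLoopA (nn : Int) (rest : List (Int × Int)) (start res cm : Int) : Int :=
  if _h : start < nn then
    if _h2 : (pvConsumeA rest start cm).2 < start then -1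
    else pvLoopA nn (pvConsumeA rest start cm).1 ((pvConsumeA rest start cm).2 + 1) (res + 1)
      (pvConsumeA rest start cm).2
  else res
termination_by (nn - start).toNat
decreasing_by simp only [not_lt] at _h2; omega

def min_sprinklers (gallery : List Int) (n : Int) : Int :=
  let nn : Int := (gallery.length : Int)
  let ranges := (PySem.List.enumerate gallery 0).map (fun p =>
    if p.2 = -1 then ((0 : Int), (0 : Int)) else (max 0 (p.1 - p.2), min nn (p.1 + p.2)))
  let sr := PySem.List.sorted ranges (fun q => q.1) false
  pvLoopA nn sr 0 0 (-1)

-- ===== PORT B =====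
-- one bucket update of B: reach[left] = max(reach[left], right) for a real sprinkler
def pvBucket (nn : Int) (reach : List Int) (p : Int × Int) : List Int :=
  if p.2 = -1 then reach
  else
    let left0 := p.1 - p.2
    let left := if left0 < 0 then 0 else left0
    if left < nn then
      let right0 := p.1 + p.2
      let right := if right0 > nn then nn else right0
      if right > reach.getD left.toNat (-1) then reach.set left.toNat right else reach
    else reach

-- B's single `for l in range(n)` jump-game scan (l is the position of the head of rest)
def pvLoopB (rest : List Int) (l farthest curr_end res : Int) : Int :=
  match rest with
  | [] => res
  | x :: tl =>
    if l > curr_end then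
      if (if x > farthest then x else farthest) < l then -1
      else pvLoopB tl (l + 1) (if x > farthest then x else farthest)
        (if x > farthest then x else farthest) (res + 1)
    else pvLoopB tl (l + 1) (if x > farthest then x else farthest) curr_end res

def min_sprinklers_alt (gallery : List Int) (n : Int) : Int :=
  let nn : Int := (gallery.length : Int)
  let reach := (PySem.List.enumerate gallery 0).foldl (pvBucket nn) (List.replicate gallery.length (-1 : Int))
  pvLoopB reach 0 (-1) (-1) 0

-- ===== PRECONDITION & SPEC =====
-- On galleries where no working sprinkler waters position 0 but a -1 (no-sprinkler) entry is
-- present and the working sprinklers water every other position, A counts the phantom [0,0]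
-- interval left over from its `ranges` initialisation and returns a positive count, while B
-- returns -1 — the intended answer, since position 0 cannot actually be watered.
def D_min_sprinklers (gallery : List Int) (n : Int) : Prop :=
  (-1 : Int) ∈ gallery ∧
  (∀ p ∈ PySem.List.enumerate gallery 0, p.2 < p.1) ∧
  (∀ s ∈ List.range gallery.length, 1 ≤ s →
    ∃ p ∈ PySem.List.enumerate gallery 0, p.2 ≠ -1 ∧
      max 0 (p.1 - p.2) ≤ (s : Int) ∧ (s : Int) ≤ min (gallery.length : Int) (p.1 + p.2))
instance (gallery : List Int) (n : Int) : Decidable (D_min_sprinklers gallery n) := by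
  unfold D_min_sprinklers; infer_instance

def Spec_min_sprinklers (gallery : List Int) (n : Int) (out : Int) : Prop :=
  ¬ D_min_sprinklers gallery n → out = min_sprinklers_alt gallery n
instance (gallery : List Int) (n : Int) (out : Int) : Decidable (Spec_min_sprinklers gallery n out) := by
  unfold Spec_min_sprinklers; infer_instance

def pvDiffWitness_min_sprinklers : List Int × Int := ([-1], 1)
def pvDiffWitnessOut_min_sprinklers : Int × Int := (1, -1)

-- ===== CLAIM (what is proved, stated in full; the proofs are below) =====
def Claim_unchanged_min_sprinklers : Prop := ∀ (gallery : List Int) (n : Int), Dom_min_sprinklers gallery n → Spec_min_sprinklers gallery n (min_sprinklers gallery n)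
def Claim_changed_min_sprinklers : Prop := Dom_min_sprinklers (pvDiffWitness_min_sprinklers.1) (pvDiffWitness_min_sprinklers.2) ∧ D_min_sprinklers (pvDiffWitness_min_sprinklers.1) (pvDiffWitness_min_sprinklers.2) ∧ min_sprinklers (pvDiffWitness_min_sprinklers.1) (pvDiffWitness_min_sprinklers.2) = pvDiffWitnessOut_min_sprinklers.1 ∧ min_sprinklers_alt (pvDiffWitness_min_sprinklers.1) (pvDiffWitness_min_sprinklers.2) = pvDiffWitnessOut_min_sprinklers.2 ∧ pvDiffWitnessOut_min_sprinklers.1 ≠ pvDiffWitnessOut_min_sprinklers.2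
def Claim_exact_min_sprinklers : Prop := ∀ (gallery : List Int) (n : Int), Dom_min_sprinklers gallery n → D_min_sprinklers gallery n → min_sprinklers gallery n ≠ min_sprinklers_alt gallery n

-- ===== LEMMAS AND PROOFS =====

-- maximal coverage reachable from intervals with left endpoint ≤ s (A's curr_max after the inner loop)
def pvM (I : List (Int × Int)) (s : Int) : Int :=
  I.foldl (fun m q => if q.1 ≤ s then max m q.2 else m) (-1)

-- maximal value among reach[0..s] (B's farthest after position s)
def pvMr (xs : List Int) (s : Int) : Int :=
  (xs.take (s + 1).toNat).foldl max (-1)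

-- the common abstract greedy loop both ports compute
def pvGreedy (nn : Int) (M : Int → Int) (start res : Int) : Int :=
  if _h : start < nn then
    if _h2 : M start < start then -1
    else pvGreedy nn M (M start + 1) (res + 1)
  else res
termination_by (nn - start).toNat
decreasing_by simp only [not_lt] at _h2; omega

-- contribution of gallery item p to A's coverage max at threshold s (phantom 0 for -1 entries)
def pvCA (nn s : Int) (p : Int × Int) : Int :=
  if p.2 = -1 then (if (0 : Int) ≤ s then 0 else -1)
  else if max 0 (p.1 - p.2) ≤ s then min nn (p.1 + p.2) else -1

-- contribution of gallery item p to B's coverage max at threshold s (-1 entries contribute nothing)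
def pvCB (nn s : Int) (p : Int × Int) : Int :=
  if p.2 = -1 then (-1 : Int)
  else if max 0 (p.1 - p.2) ≤ s then min nn (p.1 + p.2) else -1

-- generic fold-max facts --------------------------------------------------

theorem pv_foldl_max_le {t : List Int} {a b : Int} (ha : a ≤ b) (h : ∀ y ∈ t, y ≤ b) :
    t.foldl max a ≤ b := by
  induction t generalizing a with
  | nil => exact ha
  | cons x xs ih =>
      exact ih (max_le ha (h x List.mem_cons_self)) (fun y hy => h y (List.mem_cons_of_mem _ hy))

theorem pv_foldl_max_map_mono {α : Type} (l : List α) (f g : α → Int) {a b : Int}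
    (hab : a ≤ b) (h : ∀ p ∈ l, f p ≤ g p) :
    (l.map f).foldl max a ≤ (l.map g).foldl max b := by
  induction l generalizing a b with
  | nil => simpa using hab
  | cons x xs ih =>
      simp only [List.map_cons, List.foldl_cons]
      exact ih (max_le_max hab (h x List.mem_cons_self)) (fun p hp => h p (List.mem_cons_of_mem _ hp))

theorem pv_foldl_max_init_out (t : List Int) (a r : Int) :
    t.foldl max (max a r) = max (t.foldl max a) r := by
  induction t generalizing a with
  | nil => rfl
  | cons x xs ih =>
      simp only [List.foldl_cons]
      rw [show max (max a r) x = max (max a x) r by omega, ih]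

theorem pv_foldl_max_set : ∀ (xs : List Int) (j : Nat) (r a : Int) (hj : j < xs.length),
    xs[j] ≤ r → (xs.set j r).foldl max a = max (xs.foldl max a) r := by
  intro xs
  induction xs with
  | nil => intro j r a h; simp at h
  | cons x tl ih =>
      intro j r a hj hx
      cases j with
      | zero =>
          simp only [List.getElem_cons_zero] at hx
          simp only [List.set_cons_zero, List.foldl_cons]
          rw [pv_foldl_max_init_out tl a r, pv_foldl_max_init_out tl a x]
          omega
      | succ j =>
          simp only [List.getElem_cons_succ] at hx
          simp only [List.set_cons_succ, List.foldl_cons]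
          exact ih j r (max a x) (by simpa using hj) hx

-- pvM basics ---------------------------------------------------------------

theorem pvM_fold_all_le {s : Int} : ∀ (l : List (Int × Int)) (m : Int), (∀ q ∈ l, q.1 ≤ s) →
    l.foldl (fun m q => if q.1 ≤ s then max m q.2 else m) m = l.foldl (fun m q => max m q.2) m := by
  intro l
  induction l with
  | nil => intro m _; rfl
  | cons x tl ih =>
      intro m h
      rw [List.foldl_cons, List.foldl_cons, if_pos (h x List.mem_cons_self)]
      exact ih _ (fun q hq => h q (List.mem_cons_of_mem _ hq))

theorem pvM_fold_all_gt {s : Int} : ∀ (l : List (Int × Int)) (m : Int), (∀ q ∈ l, s < q.1) →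
    l.foldl (fun m q => if q.1 ≤ s then max m q.2 else m) m = m := by
  intro l
  induction l with
  | nil => intro m _; rfl
  | cons x tl ih =>
      intro m h
      have hx : ¬ (x.1 ≤ s) := by have := h x List.mem_cons_self; omega
      rw [List.foldl_cons, if_neg hx]
      exact ih _ (fun q hq => h q (List.mem_cons_of_mem _ hq))

theorem pvM_as_max {s : Int} : ∀ (I : List (Int × Int)) (m : Int), -1 ≤ m →
    I.foldl (fun m q => if q.1 ≤ s then max m q.2 else m) m
      = (I.map (fun q => if q.1 ≤ s then q.2 else -1)).foldl max m := by
  intro I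
  induction I with
  | nil => intro m _; rfl
  | cons x tl ih =>
      intro m hm
      simp only [List.foldl_cons, List.map_cons]
      by_cases h : x.1 ≤ s
      · rw [if_pos h, if_pos h]; exact ih _ (by omega)
      · rw [if_neg h, if_neg h, show max m (-1) = m by omega]; exact ih _ hm

-- A's two-pointer loop computes pvGreedy ----------------------------------

theorem pvConsumeA_eq (start : Int) : ∀ (rest : List (Int × Int)) (cm : Int),
    pvConsumeA rest start cm =
      (rest.dropWhile (fun q => decide (q.1 ≤ start)),
       (rest.takeWhile (fun q => decide (q.1 ≤ start))).foldl (fun m q => max m q.2) cm) := by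
  intro rest
  induction rest with
  | nil => intro cm; rfl
  | cons x tl ih =>
      intro cm
      by_cases h : x.1 > start
      · simp [pvConsumeA, h, show ¬ x.1 ≤ start by omega]
      · simp only [pvConsumeA, if_neg h]
        simp only [not_lt] at h
        simp [h, ih]

theorem pv_pw_dropWhile_gt (start : Int) : ∀ (l : List (Int × Int)),
    l.Pairwise (fun a b => a.1 ≤ b.1) →
    ∀ q ∈ l.dropWhile (fun q => decide (q.1 ≤ start)), start < q.1 := by
  intro l
  induction l with
  | nil => intro _ q hq; simp at hq
  | cons x tl ih =>
      intro hpw q hq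
      rcases List.pairwise_cons.1 hpw with ⟨hx, htl⟩
      by_cases h : x.1 ≤ start
      · rw [List.dropWhile_cons, if_pos (by simpa using h)] at hq
        exact ih htl q hq
      · rw [List.dropWhile_cons, if_neg (by simpa using h)] at hq
        rcases List.mem_cons.1 hq with rfl | hq
        · omega
        · have := hx q hq; omega

theorem pvLoopA_eq (nn : Int) (S : List (Int × Int)) (hS : S.Pairwise (fun a b => a.1 ≤ b.1)) :
    ∀ (N : Nat) (start res cm : Int) (done rest : List (Int × Int)),
      (nn - start).toNat ≤ N → done ++ rest = S → (∀ q ∈ done, q.1 ≤ start) →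
      cm = done.foldl (fun m q => max m q.2) (-1) →
      pvLoopA nn rest start res cm = pvGreedy nn (pvM S) start res := by
  intro N
  induction N with
  | zero =>
      intro start res cm done rest hN hsplit hdone hcm
      rw [pvLoopA, pvGreedy, dif_neg (by omega), dif_neg (by omega)]
  | succ N ih =>
      intro start res cm done rest hN hsplit hdone hcm
      by_cases hlt : start < nn
      · set P : Int × Int → Bool := fun q => decide (q.1 ≤ start) with hP
        have hrest_pw : rest.Pairwise (fun a b => a.1 ≤ b.1) :=
          List.Pairwise.sublist (hsplit ▸ List.sublist_append_right done rest) hS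
        have hdrop : ∀ q ∈ rest.dropWhile P, start < q.1 := pv_pw_dropWhile_gt start rest hrest_pw
        have htake : ∀ q ∈ rest.takeWhile P, q.1 ≤ start := by
          intro q hq
          have := List.mem_takeWhile_imp hq
          simpa [hP] using this
        have hsplit' : (done ++ rest.takeWhile P) ++ rest.dropWhile P = S := by
          rw [List.append_assoc, List.takeWhile_append_dropWhile]; exact hsplit
        have hMS : pvM S start = (done ++ rest.takeWhile P).foldl (fun m q => max m q.2) (-1) := by
          rw [← hsplit']
          unfold pvM
          rw [List.foldl_append]
          rw [pvM_fold_all_gt (rest.dropWhile P) _ hdrop]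
          exact pvM_fold_all_le (done ++ rest.takeWhile P) (-1)
            (fun q hq => (List.mem_append.1 hq).elim (hdone q) (htake q))
        have hcons : pvConsumeA rest start cm =
            (rest.dropWhile P, (rest.takeWhile P).foldl (fun m q => max m q.2) cm) :=
          pvConsumeA_eq start rest cm
        have hcm' : (pvConsumeA rest start cm).2 = pvM S start := by
          rw [hcons, hMS, List.foldl_append, ← hcm]
        rw [pvLoopA, pvGreedy, dif_pos hlt, dif_pos hlt]
        by_cases hfail : pvM S start < start
        · rw [dif_pos (by rw [hcm']; exact hfail), dif_pos hfail]
        · rw [dif_neg (by rw [hcm']; exact hfail), dif_neg hfail, hcm']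
          have hnext : (pvConsumeA rest start cm).1 = rest.dropWhile P := by rw [hcons]
          rw [hnext]
          exact ih (pvM S start + 1) (res + 1) (pvM S start)
            (done ++ rest.takeWhile P) (rest.dropWhile P)
            (by omega) hsplit'
            (by intro q hq
                rcases List.mem_append.1 hq with h | h
                · have := hdone q h; omega
                · have := htake q h; omega)
            (by rw [hMS])
      · rw [pvLoopA, pvGreedy, dif_neg hlt, dif_neg hlt]

-- B's jump-game scan computes pvGreedy ------------------------------------

theorem pvMr_neg1_le (xs : List Int) (s : Int) : -1 ≤ pvMr xs s :=
  (PySem.List.le_foldl_max _ _).1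

theorem pvMr_succ (reach : List Int) (k : Nat) (hk : k < reach.length) :
    pvMr reach (k : Int) = max (pvMr reach ((k : Int) - 1)) (reach[k]'hk) := by
  unfold pvMr
  rw [show ((k : Int) + 1).toNat = k + 1 by omega, show ((k : Int) - 1 + 1).toNat = k by omega]
  rw [List.take_add_one, List.getElem?_eq_getElem hk]
  rw [Option.toList_some, List.foldl_append, List.foldl_cons, List.foldl_nil]

theorem pvLoopB_eq (reach : List Int) :
    ∀ (rest : List Int) (k : Nat) (farthest curr_end res : Int),
      rest = reach.drop k →
      farthest = pvMr reach ((k : Int) - 1) →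
      (k : Int) ≤ curr_end + 1 →
      pvLoopB rest (k : Int) farthest curr_end res
        = pvGreedy (reach.length : Int) (pvMr reach) (curr_end + 1) res := by
  intro rest
  induction rest with
  | nil =>
      intro k farthest curr_end res hdrop hfar hce
      have hlen : reach.length ≤ k := List.drop_eq_nil_iff.1 hdrop.symm
      rw [pvLoopB, pvGreedy, dif_neg (by push_cast; omega)]
  | cons x tl ih =>
      intro k farthest curr_end res hdrop hfar hce
      have hk : k < reach.length := by
        by_contra h
        rw [List.drop_eq_nil_iff.2 (by omega)] at hdrop
        simp at hdrop
      have hcons : (x :: tl : List Int) = reach[k]'hk :: reach.drop (k + 1) := by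
        rw [hdrop]; exact List.drop_eq_getElem_cons hk
      have hx : x = reach[k]'hk := (List.cons.injEq _ _ _ _ ▸ hcons).1
      have htl : tl = reach.drop (k + 1) := (List.cons.injEq _ _ _ _ ▸ hcons).2
      have hf2 : (if x > farthest then x else farthest) = pvMr reach (k : Int) := by
        rw [pvMr_succ reach k hk, hfar, hx]; split_ifs <;> omega
      rw [pvLoopB]
      simp only [hf2]
      by_cases htrig : (k : Int) > curr_end
      · have hk_eq : curr_end + 1 = (k : Int) := by omega
        rw [if_pos htrig, hk_eq, pvGreedy, dif_pos (by push_cast; omega)]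
        by_cases hfail : pvMr reach (k : Int) < (k : Int)
        · rw [if_pos hfail, dif_pos hfail]
        · rw [if_neg hfail, dif_neg hfail]
          have := ih (k + 1) (pvMr reach (k : Int)) (pvMr reach (k : Int)) (res + 1)
            (by rw [htl]) (by push_cast; ring_nf) (by push_cast; omega)
          push_cast at this ⊢
          rw [this]
      · rw [if_neg htrig]
        have := ih (k + 1) (pvMr reach (k : Int)) curr_end res
          (by rw [htl]) (by push_cast; ring_nf) (by push_cast; omega)
        push_cast at this ⊢
        rw [this]

-- the bucket array: length, init, and its prefix max as a fold of contributions --------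

theorem pvBucket_length (nn : Int) (acc : List Int) (p : Int × Int) :
    (pvBucket nn acc p).length = acc.length := by
  by_cases h1 : p.2 = -1
  · simp [pvBucket, h1]
  · simp only [pvBucket, if_neg h1]
    split_ifs <;> simp

theorem pvBucketFold_length (nn : Int) : ∀ (items : List (Int × Int)) (acc : List Int),
    (items.foldl (pvBucket nn) acc).length = acc.length := by
  intro items
  induction items with
  | nil => intro acc; rfl
  | cons p tl ih => intro acc; rw [List.foldl_cons, ih, pvBucket_length]

theorem pvMr_replicate (n : Nat) (s : Int) : pvMr (List.replicate n (-1 : Int)) s = -1 := by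
  unfold pvMr
  rw [List.take_replicate]
  have h1 : (-1 : Int) ≤ (List.replicate (min (s+1).toNat n) (-1 : Int)).foldl max (-1) :=
    (PySem.List.le_foldl_max _ _).1
  have h2 : (List.replicate (min (s+1).toNat n) (-1 : Int)).foldl max (-1) ≤ -1 :=
    pv_foldl_max_le le_rfl (by intro y hy; rw [List.eq_of_mem_replicate hy])
  omega

theorem pvBucket_step (nn : Int) (acc : List Int) (hacc : (acc.length : Int) = nn)
    (p : Int × Int) (s : Int) (hs0 : 0 ≤ s) (hsn : s < nn) :
    pvMr (pvBucket nn acc p) s = max (pvMr acc s) (pvCB nn s p) := by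
  simp only [pvBucket, pvCB]
  by_cases hneg : p.2 = -1
  · rw [if_pos hneg, if_pos hneg]
    have := pvMr_neg1_le acc s; omega
  · rw [if_neg hneg, if_neg hneg]
    rw [show (if p.1 - p.2 < 0 then (0 : Int) else p.1 - p.2) = max 0 (p.1 - p.2) by split_ifs <;> omega,
      show (if p.1 + p.2 > nn then nn else p.1 + p.2) = min nn (p.1 + p.2) by split_ifs <;> omega]
    set left : Int := max 0 (p.1 - p.2) with hleft
    set right : Int := min nn (p.1 + p.2) with hright
    have hl0 : 0 ≤ left := by omega
    by_cases hln : left < nn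
    · rw [if_pos hln]
      have hjlen : left.toNat < acc.length := by omega
      have hgetD : acc.getD left.toNat (-1) = acc[left.toNat]'hjlen := List.getD_eq_getElem acc (-1) hjlen
      by_cases hls : left ≤ s
      · rw [if_pos hls]
        have hjm : left.toNat < (s + 1).toNat := by omega
        by_cases hgt : right > acc.getD left.toNat (-1)
        · rw [if_pos hgt]
          unfold pvMr
          rw [List.take_set]
          have hjlen' : left.toNat < (acc.take (s+1).toNat).length := by
            simp [List.length_take]; omega
          rw [pv_foldl_max_set _ left.toNat right (-1) hjlen'
            (by rw [List.getElem_take]; rw [hgetD] at hgt; omega)]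
        · rw [if_neg hgt]
          have hmem : acc[left.toNat]'hjlen ∈ acc.take (s+1).toNat := by
            have h5 : (acc.take (s+1).toNat)[left.toNat]'(by simp [List.length_take]; omega)
                = acc[left.toNat]'hjlen := List.getElem_take
            rw [← h5]; exact List.getElem_mem _
          have hle : acc[left.toNat]'hjlen ≤ pvMr acc s := (PySem.List.le_foldl_max _ _).2 _ hmem
          rw [hgetD] at hgt; omega
      · rw [if_neg hls]
        have hjm : (s + 1).toNat ≤ left.toNat := by omega
        have hmr := pvMr_neg1_le acc s
        by_cases hgt : right > acc.getD left.toNat (-1)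
        · rw [if_pos hgt]
          unfold pvMr
          rw [List.take_set, List.set_eq_of_length_le (by simp [List.length_take]; omega)]
          unfold pvMr at hmr; omega
        · rw [if_neg hgt]; omega
    · rw [if_neg hln, if_neg (by omega)]
      have := pvMr_neg1_le acc s; omega

theorem pvBucketFold_char (nn : Int) : ∀ (items : List (Int × Int)) (acc : List Int),
    (acc.length : Int) = nn → ∀ (s : Int), 0 ≤ s → s < nn →
    pvMr (items.foldl (pvBucket nn) acc) s = (items.map (pvCB nn s)).foldl max (pvMr acc s) := by
  intro items
  induction items with
  | nil => intro acc _ s _ _; rfl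
  | cons p tl ih =>
      intro acc hacc s hs0 hsn
      rw [List.foldl_cons, List.map_cons, List.foldl_cons,
        ih (pvBucket nn acc p) (by rw [pvBucket_length]; exact hacc) s hs0 hsn,
        pvBucket_step nn acc hacc p s hs0 hsn]

-- the A-side coverage function as a fold of contributions -------------------

theorem pvM_ranges_char (gallery : List Int) (nn : Int) (s : Int) :
    pvM ((PySem.List.enumerate gallery 0).map (fun p =>
        if p.2 = -1 then ((0 : Int), (0 : Int)) else (max 0 (p.1 - p.2), min nn (p.1 + p.2)))) s
      = ((PySem.List.enumerate gallery 0).map (pvCA nn s)).foldl max (-1) := by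
  unfold pvM
  rw [pvM_as_max _ (-1) le_rfl, List.map_map]
  congr 1
  apply List.map_congr_left
  intro p _
  by_cases h : p.2 = -1 <;> simp [pvCA, h]

-- permutation invariance of pvM under A's sort
theorem pvM_perm {I J : List (Int × Int)} (h : I.Perm J) (s : Int) : pvM I s = pvM J s := by
  unfold pvM
  exact List.Perm.foldl_eq
    (rcomm := ⟨fun m a b => by
      by_cases h1 : a.1 ≤ s <;> by_cases h2 : b.1 ≤ s <;> simp [h1, h2] <;> omega⟩) h (-1)

-- generic pvGreedy lemmas --------------------------------------------------

theorem pvGreedy_congr (nn : Int) (M M' : Int → Int)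
    (h : ∀ s, 0 ≤ s → s < nn → M s = M' s) :
    ∀ (N : Nat) (start res : Int), (nn - start).toNat ≤ N → 0 ≤ start →
      pvGreedy nn M start res = pvGreedy nn M' start res := by
  intro N
  induction N with
  | zero =>
      intro start res hN h0
      conv_lhs => rw [pvGreedy]
      conv_rhs => rw [pvGreedy]
      rw [dif_neg (by omega), dif_neg (by omega)]
  | succ N ih =>
      intro start res hN h0
      by_cases hlt : start < nn
      · conv_lhs => rw [pvGreedy]
        conv_rhs => rw [pvGreedy]
        rw [dif_pos hlt, dif_pos hlt, h start h0 hlt]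
        by_cases hfail : M' start < start
        · rw [dif_pos hfail, dif_pos hfail]
        · rw [dif_neg hfail, dif_neg hfail]
          exact ih (M' start + 1) (res + 1) (by omega) (by omega)
      · conv_lhs => rw [pvGreedy]
        conv_rhs => rw [pvGreedy]
        rw [dif_neg hlt, dif_neg hlt]

theorem pvGreedy_fail (nn : Int) (M : Int → Int) (s0 : Int) (hs0n : s0 < nn)
    (hfail : M s0 < s0) (hmono : ∀ s, 0 ≤ s → s ≤ s0 → M s ≤ M s0) :
    ∀ (N : Nat) (start res : Int), (nn - start).toNat ≤ N → 0 ≤ start → start ≤ s0 →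
      pvGreedy nn M start res = -1 := by
  intro N
  induction N with
  | zero => intro start res hN h0 hs; exact absurd hN (by omega)
  | succ N ih =>
      intro start res hN h0 hs
      rw [pvGreedy, dif_pos (by omega)]
      by_cases hf : M start < start
      · rw [dif_pos hf]
      · rw [dif_neg hf]
        have hms : M start ≤ M s0 := hmono start h0 hs
        exact ih (M start + 1) (res + 1) (by omega) (by omega) (by omega)

theorem pvGreedy_succeeds (nn : Int) (M : Int → Int)
    (hcov : ∀ s, 0 ≤ s → s < nn → s ≤ M s) :
    ∀ (N : Nat) (start res : Int), (nn - start).toNat ≤ N → 0 ≤ start →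
      res ≤ pvGreedy nn M start res := by
  intro N
  induction N with
  | zero =>
      intro start res hN h0
      rw [pvGreedy, dif_neg (by omega)]
  | succ N ih =>
      intro start res hN h0
      by_cases hlt : start < nn
      · rw [pvGreedy, dif_pos hlt, dif_neg (by have := hcov start h0 hlt; omega)]
        have := ih (M start + 1) (res + 1) (by have := hcov start h0 hlt; omega)
          (by have := hcov start h0 hlt; omega)
        omega
      · rw [pvGreedy, dif_neg hlt]

-- assembling the ports ------------------------------------------------------

def pvEnum (gallery : List Int) : List (Int × Int) := PySem.List.enumerate gallery 0

def pvFoldA (gallery : List Int) (nn s : Int) : Int :=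
  ((pvEnum gallery).map (pvCA nn s)).foldl max (-1)

def pvFoldB (gallery : List Int) (nn s : Int) : Int :=
  ((pvEnum gallery).map (pvCB nn s)).foldl max (-1)

theorem minA_eq (gallery : List Int) (n : Int) :
    min_sprinklers gallery n
      = pvGreedy (gallery.length : Int) (pvFoldA gallery (gallery.length : Int)) 0 0 := by
  have h0 : min_sprinklers gallery n
      = pvLoopA (gallery.length : Int)
          (PySem.List.sorted ((PySem.List.enumerate gallery 0).map (fun p =>
            if p.2 = -1 then ((0 : Int), (0 : Int))
            else (max 0 (p.1 - p.2), min (gallery.length : Int) (p.1 + p.2)))) (fun q => q.1) false)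
          0 0 (-1) := rfl
  set nn : Int := (gallery.length : Int) with hnn
  set ranges : List (Int × Int) := (PySem.List.enumerate gallery 0).map (fun p =>
    if p.2 = -1 then ((0 : Int), (0 : Int)) else (max 0 (p.1 - p.2), min nn (p.1 + p.2))) with hranges
  set SA := PySem.List.sorted ranges (fun q => q.1) false with hSA
  have hpw : SA.Pairwise (fun a b => a.1 ≤ b.1) := PySem.List.sorted_pairwise ranges (fun q => q.1)
  rw [h0, pvLoopA_eq nn SA hpw ((nn - 0).toNat) 0 0 (-1) [] SA le_rfl rfl (by simp) rfl]
  exact pvGreedy_congr nn (pvM SA) (pvFoldA gallery nn)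
    (fun s _ _ => by
      rw [hSA, pvM_perm (PySem.List.sorted_perm ranges (fun q => q.1) false) s, hranges,
        pvM_ranges_char gallery nn s]
      rfl)
    ((nn - 0).toNat) 0 0 le_rfl le_rfl

theorem minB_eq (gallery : List Int) (n : Int) :
    min_sprinklers_alt gallery n
      = pvGreedy (gallery.length : Int) (pvFoldB gallery (gallery.length : Int)) 0 0 := by
  have h0 : min_sprinklers_alt gallery n
      = pvLoopB ((PySem.List.enumerate gallery 0).foldl (pvBucket (gallery.length : Int))
          (List.replicate gallery.length (-1 : Int))) 0 (-1) (-1) 0 := rfl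
  set nn : Int := (gallery.length : Int) with hnn
  set reach := (PySem.List.enumerate gallery 0).foldl (pvBucket nn)
    (List.replicate gallery.length (-1 : Int)) with hreach
  have hlen : reach.length = gallery.length := by
    rw [hreach, pvBucketFold_length, List.length_replicate]
  have h1 : pvLoopB reach ((0 : Nat) : Int) (-1) (-1) 0
      = pvGreedy (reach.length : Int) (pvMr reach) ((-1) + 1) 0 := by
    refine pvLoopB_eq reach reach 0 (-1) (-1) 0 (by rw [List.drop_zero]) ?_ (by norm_num)
    unfold pvMr
    norm_num
  norm_num at h1
  rw [h0, h1, hlen]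
  exact pvGreedy_congr nn (pvMr reach) (pvFoldB gallery nn)
    (fun s hs0 hsn => by
      rw [hreach, pvBucketFold_char nn (PySem.List.enumerate gallery 0)
        (List.replicate gallery.length (-1 : Int)) (by rw [List.length_replicate]) s hs0 hsn,
        pvMr_replicate]
      rfl)
    ((nn - 0).toNat) 0 0 le_rfl le_rfl

-- interface lemmas for the two coverage folds --------------------------------

theorem pvFoldA_ge (gallery : List Int) (nn s : Int) : -1 ≤ pvFoldA gallery nn s :=
  (PySem.List.le_foldl_max _ _).1

theorem pvFoldB_ge (gallery : List Int) (nn s : Int) : -1 ≤ pvFoldB gallery nn s :=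
  (PySem.List.le_foldl_max _ _).1

theorem pvCA_le_pvFoldA {gallery : List Int} {nn s : Int} {p : Int × Int}
    (hp : p ∈ pvEnum gallery) : pvCA nn s p ≤ pvFoldA gallery nn s :=
  (PySem.List.le_foldl_max _ _).2 _ (List.mem_map_of_mem hp)

theorem pvCB_le_pvFoldB {gallery : List Int} {nn s : Int} {p : Int × Int}
    (hp : p ∈ pvEnum gallery) : pvCB nn s p ≤ pvFoldB gallery nn s :=
  (PySem.List.le_foldl_max _ _).2 _ (List.mem_map_of_mem hp)

theorem pvFoldA_le {gallery : List Int} {nn s b : Int} (hb : -1 ≤ b)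
    (h : ∀ p ∈ pvEnum gallery, pvCA nn s p ≤ b) : pvFoldA gallery nn s ≤ b := by
  refine pv_foldl_max_le hb ?_
  intro y hy
  rcases List.mem_map.1 hy with ⟨p, hp, rfl⟩
  exact h p hp

theorem pvFoldB_le {gallery : List Int} {nn s b : Int} (hb : -1 ≤ b)
    (h : ∀ p ∈ pvEnum gallery, pvCB nn s p ≤ b) : pvFoldB gallery nn s ≤ b := by
  refine pv_foldl_max_le hb ?_
  intro y hy
  rcases List.mem_map.1 hy with ⟨p, hp, rfl⟩
  exact h p hp

-- pointwise comparison of the two contribution functions --------------------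

theorem pvCA_eq_pvCB_of_ne {nn s : Int} {p : Int × Int} (h : p.2 ≠ -1) :
    pvCA nn s p = pvCB nn s p := by
  unfold pvCA pvCB
  rw [if_neg h, if_neg h]

theorem pvCB_le_pvCA (nn s : Int) (p : Int × Int) : pvCB nn s p ≤ pvCA nn s p := by
  by_cases h : p.2 = -1
  · unfold pvCA pvCB; rw [if_pos h, if_pos h]; split_ifs <;> omega
  · rw [pvCA_eq_pvCB_of_ne h]

theorem pvEnum_fst_bounds {gallery : List Int} {p : Int × Int} (h : p ∈ pvEnum gallery) :
    0 ≤ p.1 ∧ p.1 < (gallery.length : Int) := by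
  rcases (PySem.List.mem_enumerate_iff gallery 0 p).1 h with ⟨k, hk, rfl⟩
  constructor <;> simp <;> omega

theorem pv_mem_snd {gallery : List Int} {p : Int × Int} (h : p ∈ pvEnum gallery) :
    p.2 ∈ gallery := by
  have := List.mem_map_of_mem (f := fun x : Int × Int => x.2) h
  unfold pvEnum at this
  rwa [PySem.List.map_snd_enumerate] at this

theorem pv_neg1_mem_enum {gallery : List Int} (h : (-1 : Int) ∈ gallery) :
    ∃ p ∈ pvEnum gallery, p.2 = -1 := by
  rcases List.getElem_of_mem h with ⟨k, hk, hg⟩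
  exact ⟨((k : Int), -1), (PySem.List.mem_enumerate_iff gallery 0 _).2 ⟨k, hk, by simp [hg]⟩, rfl⟩

-- A's and B's coverage maxima agree whenever some real sprinkler reaches position 0
theorem pvFoldAB_eq (gallery : List Int) (nn : Int)
    (hyp : (-1 : Int) ∈ gallery → ∃ p ∈ pvEnum gallery, p.1 ≤ p.2)
    (s : Int) (hs0 : 0 ≤ s) (hsn : s < nn) :
    pvFoldA gallery nn s = pvFoldB gallery nn s := by
  have hBA : pvFoldB gallery nn s ≤ pvFoldA gallery nn s := by
    unfold pvFoldA pvFoldB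
    exact pv_foldl_max_map_mono _ _ _ le_rfl (fun p _ => pvCB_le_pvCA nn s p)
  have hAB : pvFoldA gallery nn s ≤ pvFoldB gallery nn s := by
    refine pvFoldA_le (pvFoldB_ge gallery nn s) ?_
    intro p hp
    by_cases hneg : p.2 = -1
    · have hmemg : (-1 : Int) ∈ gallery := hneg ▸ pv_mem_snd hp
      rcases hyp hmemg with ⟨q, hq, hq12⟩
      have hq1 : 0 ≤ q.1 := (pvEnum_fst_bounds hq).1
      have hqne : q.2 ≠ -1 := by omega
      have hCBq : 0 ≤ pvCB nn s q := by
        unfold pvCB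
        rw [if_neg hqne, if_pos (by omega)]
        omega
      have hle : pvCB nn s q ≤ pvFoldB gallery nn s := pvCB_le_pvFoldB hq
      unfold pvCA
      rw [if_pos hneg, if_pos hs0]
      omega
    · rw [pvCA_eq_pvCB_of_ne hneg]
      exact pvCB_le_pvFoldB hp
  omega

-- at an unwaterable position s0 ≥ 1 both coverage maxima fall short of s0
theorem pvFold_uncovered (gallery : List Int) (nn : Int)
    (s0 : Int) (h1 : 1 ≤ s0)
    (hunc : ¬ ∃ p ∈ pvEnum gallery, p.2 ≠ -1 ∧ max 0 (p.1 - p.2) ≤ s0 ∧ s0 ≤ min nn (p.1 + p.2)) :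
    pvFoldA gallery nn s0 < s0 ∧ pvFoldB gallery nn s0 < s0 := by
  have key : ∀ p ∈ pvEnum gallery, pvCA nn s0 p ≤ s0 - 1 := by
    intro p hp
    by_cases hneg : p.2 = -1
    · unfold pvCA; rw [if_pos hneg]; split_ifs <;> omega
    · rw [pvCA_eq_pvCB_of_ne hneg]
      unfold pvCB
      rw [if_neg hneg]
      by_cases hc : max 0 (p.1 - p.2) ≤ s0
      · rw [if_pos hc]
        by_contra hbig
        exact hunc ⟨p, hp, hneg, hc, by omega⟩
      · rw [if_neg hc]; omega
  have hA := pvFoldA_le (by omega) key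
  have hB := pvFoldB_le (nn := nn) (s := s0) (gallery := gallery) (by omega)
    (fun p hp => le_trans (pvCB_le_pvCA nn s0 p) (key p hp))
  omega

-- monotonicity of the coverage maxima in the threshold ----------------------

theorem pvFoldA_mono (gallery : List Int) (nn : Int) (s s' : Int) (hs0 : 0 ≤ s) (hss : s ≤ s') :
    pvFoldA gallery nn s ≤ pvFoldA gallery nn s' := by
  refine pvFoldA_le (pvFoldA_ge gallery nn s') ?_
  intro p hp
  by_cases hneg : p.2 = -1
  · have h2 : pvCA nn s' p = 0 := by unfold pvCA; rw [if_pos hneg, if_pos (by omega)]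
    have h3 := pvCA_le_pvFoldA (nn := nn) (s := s') hp
    unfold pvCA
    rw [if_pos hneg]
    split_ifs <;> omega
  · unfold pvCA
    rw [if_neg hneg]
    by_cases hc : max 0 (p.1 - p.2) ≤ s
    · rw [if_pos hc]
      have h2 : pvCA nn s' p = min nn (p.1 + p.2) := by
        unfold pvCA; rw [if_neg hneg, if_pos (by omega)]
      have h3 := pvCA_le_pvFoldA (nn := nn) (s := s') hp
      omega
    · rw [if_neg hc]
      have := pvFoldA_ge gallery nn s'
      omega

theorem pvFoldB_mono (gallery : List Int) (nn : Int) (s s' : Int) (hs0 : 0 ≤ s) (hss : s ≤ s') :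
    pvFoldB gallery nn s ≤ pvFoldB gallery nn s' := by
  refine pvFoldB_le (pvFoldB_ge gallery nn s') ?_
  intro p hp
  by_cases hneg : p.2 = -1
  · have := pvFoldB_ge gallery nn s'
    unfold pvCB
    rw [if_pos hneg]
    omega
  · unfold pvCB
    rw [if_neg hneg]
    by_cases hc : max 0 (p.1 - p.2) ≤ s
    · rw [if_pos hc]
      have h2 : pvCB nn s' p = min nn (p.1 + p.2) := by
        unfold pvCB; rw [if_neg hneg, if_pos (by omega)]
      have h3 := pvCB_le_pvFoldB (nn := nn) (s := s') hp
      omega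
    · rw [if_neg hc]
      have := pvFoldB_ge gallery nn s'
      omega

-- main proofs ---------------------------------------------------------------

theorem pv_unchanged (gallery : List Int) (n : Int) (hnD : ¬ D_min_sprinklers gallery n) :
    min_sprinklers gallery n = min_sprinklers_alt gallery n := by
  rw [minA_eq gallery n, minB_eq gallery n]
  set nn : Int := (gallery.length : Int) with hnn
  by_cases hm : (-1 : Int) ∈ gallery
  · by_cases hcov0 : ∃ p ∈ pvEnum gallery, p.1 ≤ p.2
    · exact pvGreedy_congr nn (pvFoldA gallery nn) (pvFoldB gallery nn)
        (fun s hs0 hsn => pvFoldAB_eq gallery nn (fun _ => hcov0) s hs0 hsn)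
        ((nn - 0).toNat) 0 0 le_rfl le_rfl
    · -- conjuncts 1 and 2 of D hold, so conjunct 3 must fail: some position s0 ≥ 1 is unwaterable
      have hc2 : ∀ p ∈ PySem.List.enumerate gallery 0, p.2 < p.1 := by
        intro p hp
        by_contra hcon
        exact hcov0 ⟨p, hp, by omega⟩
      have hc3 : ¬ (∀ s ∈ List.range gallery.length, 1 ≤ s →
          ∃ p ∈ PySem.List.enumerate gallery 0, p.2 ≠ -1 ∧
            max 0 (p.1 - p.2) ≤ (s : Int) ∧ (s : Int) ≤ min (gallery.length : Int) (p.1 + p.2)) := by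
        intro hc3
        exact hnD ⟨hm, hc2, hc3⟩
      rw [not_forall] at hc3
      rcases hc3 with ⟨s0n, hbad⟩
      rw [Classical.not_imp, Classical.not_imp] at hbad
      rcases hbad with ⟨hs0mem, hs0ge, hunc⟩
      have hs0lt : s0n < gallery.length := List.mem_range.1 hs0mem
      set s0 : Int := (s0n : Int) with hs0
      have h1 : 1 ≤ s0 := by omega
      have hs0nn : s0 < nn := by omega
      have huncA : ¬ ∃ p ∈ pvEnum gallery, p.2 ≠ -1 ∧
          max 0 (p.1 - p.2) ≤ s0 ∧ s0 ≤ min nn (p.1 + p.2) := by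
        intro hcon
        rcases hcon with ⟨p, hp, hpne, hpl, hpr⟩
        exact hunc ⟨p, hp, hpne, hpl, hpr⟩
      have hF := pvFold_uncovered gallery nn s0 h1 huncA
      rw [pvGreedy_fail nn (pvFoldA gallery nn) s0 hs0nn hF.1
          (fun s hs0' hss => pvFoldA_mono gallery nn s s0 hs0' hss)
          ((nn - 0).toNat) 0 0 le_rfl le_rfl (by omega),
        pvGreedy_fail nn (pvFoldB gallery nn) s0 hs0nn hF.2
          (fun s hs0' hss => pvFoldB_mono gallery nn s s0 hs0' hss)
          ((nn - 0).toNat) 0 0 le_rfl le_rfl (by omega)]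
  · exact pvGreedy_congr nn (pvFoldA gallery nn) (pvFoldB gallery nn)
      (fun s hs0 hsn => pvFoldAB_eq gallery nn (fun h => absurd h hm) s hs0 hsn)
      ((nn - 0).toNat) 0 0 le_rfl le_rfl

theorem pv_tight (gallery : List Int) (n : Int) (hD : D_min_sprinklers gallery n) :
    min_sprinklers gallery n ≠ min_sprinklers_alt gallery n := by
  rcases hD with ⟨h1, h2, h3⟩
  rw [minA_eq gallery n, minB_eq gallery n]
  set nn : Int := (gallery.length : Int) with hnn
  have hne : gallery ≠ [] := by rintro rfl; simp at h1
  have hnn1 : 1 ≤ nn := by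
    have : 0 < gallery.length := List.length_pos_iff.2 hne
    omega
  -- B's side returns -1: no real sprinkler reaches position 0
  have hB0 : pvFoldB gallery nn 0 ≤ -1 := by
    refine pvFoldB_le le_rfl ?_
    intro p hp
    unfold pvCB
    by_cases hneg : p.2 = -1
    · rw [if_pos hneg]
    · rw [if_neg hneg, if_neg (by have := h2 p hp; omega)]
  have hBval : pvGreedy nn (pvFoldB gallery nn) 0 0 = -1 := by
    rw [pvGreedy, dif_pos (by omega), dif_pos (by omega)]
  -- A's side succeeds: the phantom interval covers 0 and real sprinklers cover 1..n-1
  have hcov : ∀ s, 0 ≤ s → s < nn → s ≤ pvFoldA gallery nn s := by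
    intro s hs0 hsn
    by_cases hs1 : 1 ≤ s
    · have hsmem : s.toNat ∈ List.range gallery.length := List.mem_range.2 (by omega)
      rcases h3 s.toNat hsmem (by omega) with ⟨p, hp, hpne, hpl, hpr⟩
      rw [show ((s.toNat : Nat) : Int) = s by omega] at hpl hpr
      have hCAp : s ≤ pvCA nn s p := by
        unfold pvCA
        rw [if_neg hpne, if_pos hpl]
        omega
      have := pvCA_le_pvFoldA (nn := nn) (s := s) (gallery := gallery) hp
      omega
    · have hs0' : s = 0 := by omega
      rcases pv_neg1_mem_enum h1 with ⟨p, hp, hpneg⟩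
      have hCAp : pvCA nn s p = 0 := by unfold pvCA; rw [if_pos hpneg, if_pos hs0]
      have := pvCA_le_pvFoldA (nn := nn) (s := s) (gallery := gallery) hp
      omega
  have hAval : 0 ≤ pvGreedy nn (pvFoldA gallery nn) 0 0 :=
    pvGreedy_succeeds nn (pvFoldA gallery nn) hcov ((nn - 0).toNat) 0 0 le_rfl le_rfl
  rw [hBval]
  omega

-- ===== VERDICT (by name: the statement is the Claim_ definition above) =====
theorem min_sprinklers_spec : Claim_unchanged_min_sprinklers := by
  intro gallery n _ hnD
  exact pv_unchanged gallery n hnD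
theorem min_sprinklers_changed : Claim_changed_min_sprinklers := by
  unfold Claim_changed_min_sprinklers
  refine ⟨by decide, by decide, ?_, by decide, by decide⟩
  show min_sprinklers [-1] 1 = 1
  rw [minA_eq]
  rw [pvGreedy, dif_pos (by decide), dif_neg (by decide)]
  rw [pvGreedy, dif_neg (by decide)]
  norm_num
theorem min_sprinklers_tight : Claim_exact_min_sprinklers := by
  intro gallery n _ hD
  exact pv_tight gallery n hD
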